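-- pv_equiv track=rewrite | github.com/OrderFromChaos/cs_market | Requests_v2.py | make_nice
-- ===== SOURCE A (Python) =====
-- def make_nice(c,preservelastcomma):
--
--     if preservelastcomma == 1:
--         while ',' in c:
--             if c.count(',') == 1:
--                 c[c.index(',')] = '.'
--                 break
--             else:
--                 del c[c.index(',')]
--
--     elif preservelastcomma == 0:
--         while ',' in c:
--             del c[c.index(',')]
--
--     else:
--         #This is specifically for Columbian and Chilean Pesos.
--         while ',' in c:
--             c[c.index(',')] = '.'
--         while '.' in c:
--             del c[c.index('.')]
--         while ',' in c:
--             c[c.index(',')] = '.'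
--
--     #Just as a final checkup
--     while c.count('.') > 1:
--         del c[c.index('.')]
--
--     return c
-- ===== SOURCE B (Python) =====
-- # One counting pass per stage: build the result directly (keep only the last
-- # ','/'.' per the branch rules) instead of A's repeated index()/del scans.
-- # Mutates c in place like A (c[:] = result).
-- def _keep_last(xs, v):
--     """Drop every occurrence of v except the last, which becomes '.'."""
--     k = xs.count(v)
--     out = []
--     seen = 0
--     for x in xs:
--         if x == v:
--             seen += 1
--             if seen == k:
--                 out.append('.')
--         else:
--             out.append(x)
--     return out
--
-- def make_nice(c, preservelastcomma):
--     if preservelastcomma == 1: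
--         out = _keep_last(c, ',')
--     elif preservelastcomma == 0:
--         out = [x for x in c if x != ',']
--     else:
--         out = [x for x in c if x != ',' and x != '.']
--     res = _keep_last(out, '.')
--     c[:] = res
--     return c
-- ===== Notes on version B (the rewrite author's own statement) =====
-- stated objective: alternative
-- what changed: Replaces A's repeated while-in/index/del scans with one counting pass per stage: a shared keep-last-occurrence builder handles both the comma stage and the final dot cleanup, and the other branches become single filters.
import Mathlib
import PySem

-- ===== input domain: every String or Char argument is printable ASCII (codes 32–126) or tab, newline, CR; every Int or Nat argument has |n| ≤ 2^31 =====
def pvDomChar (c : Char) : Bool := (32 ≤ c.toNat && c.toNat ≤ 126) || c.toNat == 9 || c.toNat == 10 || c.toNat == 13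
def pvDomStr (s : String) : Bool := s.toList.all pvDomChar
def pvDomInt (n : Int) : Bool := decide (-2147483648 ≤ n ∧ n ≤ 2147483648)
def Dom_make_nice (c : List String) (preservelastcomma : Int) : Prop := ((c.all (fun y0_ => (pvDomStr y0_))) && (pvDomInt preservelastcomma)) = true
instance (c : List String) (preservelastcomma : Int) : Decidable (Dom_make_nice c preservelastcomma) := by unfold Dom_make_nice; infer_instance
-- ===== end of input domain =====

-- B replaces A's repeated while-in/index/del scans with one counting pass per stage
-- (objective: alternative). Both Pythons mutate the caller's list (A in place, B via
-- c[:] = res); the equivalence proved here is about the returned value.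

-- ===== PORT A =====
-- `while ',' in c: if c.count(',')==1: c[c.index(',')]='.'; break else: del c[c.index(',')]`
def aLoop1 (c : List String) : List String :=
  if h : "," ∈ c then
    if PySem.List.count c "," == 1 then
      match PySem.List.index? c "," with
      | some i => c.set i "."
      | none => c
    else
      match h2 : PySem.List.remove? c "," with
      | some c' => aLoop1 c'
      | none => c
  else c
termination_by c.length
decreasing_by
  rw [PySem.List.remove?_eq_some_erase _ _ h] at h2
  injection h2 with h3
  subst h3
  rw [List.length_erase_of_mem h]
  have := List.length_pos_of_mem h
  omega

-- `while v in c: del c[c.index(v)]`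
def aDel (v : String) (c : List String) : List String :=
  if h : v ∈ c then
    match h2 : PySem.List.remove? c v with
    | some c' => aDel v c'
    | none => c
  else c
termination_by c.length
decreasing_by
  rw [PySem.List.remove?_eq_some_erase _ _ h] at h2
  injection h2 with h3
  subst h3
  rw [List.length_erase_of_mem h]
  have := List.length_pos_of_mem h
  omega

-- termination helper for aRepl (setting the first ',' to '.' lowers the comma count)
theorem pv_count_set_lt (c : List String) (i : Nat)
    (h : PySem.List.index? c "," = some i) :
    (c.set i ".").count "," < c.count "," := by
  obtain ⟨pre, suf, rfl, rfl, _⟩ := (PySem.List.index?_eq_some_iff _ _ _).1 h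
  have hset : (pre ++ "," :: suf).set pre.length "." = pre ++ "." :: suf := by
    induction pre with
    | nil => simp
    | cons a t ih => simp
  rw [hset]
  simp [List.count_append]

-- `while ',' in c: c[c.index(',')] = '.'`
def aRepl (c : List String) : List String :=
  if h : "," ∈ c then
    match h2 : PySem.List.index? c "," with
    | some i => aRepl (c.set i ".")
    | none => c
  else c
termination_by c.count ","
decreasing_by exact pv_count_set_lt c i h2

-- `while c.count('.') > 1: del c[c.index('.')]`
def aFin (c : List String) : List String :=
  if PySem.List.count c "." > 1 then
    match h2 : PySem.List.remove? c "." with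
    | some c' => aFin c'
    | none => c
  else c
termination_by c.length
decreasing_by
  have hm : "." ∈ c := by
    by_contra hn
    simp [PySem.List.count_eq, List.count_eq_zero_of_not_mem hn] at *
  rw [PySem.List.remove?_eq_some_erase _ _ hm] at h2
  injection h2 with h3
  subst h3
  rw [List.length_erase_of_mem hm]
  have := List.length_pos_of_mem hm
  omega

def make_nice (c : List String) (preservelastcomma : Int) : List String :=
  let c1 :=
    if preservelastcomma == 1 then aLoop1 c
    else if preservelastcomma == 0 then aDel "," c
    else aRepl (aDel "." (aRepl c))
  aFin c1

-- ===== PORT B =====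
-- the for-loop of _keep_last(xs, v): counter `seen`, append '.' at the k-th occurrence
def bKeep (v : String) (xs : List String) (k : Nat) (seen : Nat) : List String :=
  match xs with
  | [] => []
  | x :: rest =>
    if x == v then
      let seen' := seen + 1
      if seen' == k then "." :: bKeep v rest k seen' else bKeep v rest k seen'
    else x :: bKeep v rest k seen

def keep_last (xs : List String) (v : String) : List String :=
  bKeep v xs (PySem.List.count xs v) 0

def make_nice_alt (c : List String) (preservelastcomma : Int) : List String :=
  let out :=
    if preservelastcomma == 1 then keep_last c ","
    else if preservelastcomma == 0 then c.filter (fun x => x != ",")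
    else c.filter (fun x => !(x == "," || x == "."))
  keep_last out "."

-- ===== PRECONDITION & SPEC =====
def Spec_make_nice (c : List String) (preservelastcomma : Int) (out : List String) : Prop := out = make_nice_alt c preservelastcomma
instance (c : List String) (preservelastcomma : Int) (out : List String) : Decidable (Spec_make_nice c preservelastcomma out) := by unfold Spec_make_nice; infer_instance

-- ===== CLAIM (what is proved, stated in full; the proofs are below) =====
def Claim_equal_make_nice : Prop := ∀ (c : List String) (preservelastcomma : Int), Dom_make_nice c preservelastcomma → Spec_make_nice c preservelastcomma (make_nice c preservelastcomma)

-- ===== LEMMAS AND PROOFS =====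

-- common specification of both keep-last loops: drop every v except the last, which becomes "."
def specKeep (v : String) : List String → List String
  | [] => []
  | x :: xs => if x = v then (if v ∈ xs then specKeep v xs else "." :: xs) else x :: specKeep v xs

theorem specKeep_of_not_mem (v : String) (c : List String) (h : v ∉ c) :
    specKeep v c = c := by
  induction c with
  | nil => rfl
  | cons x xs ih =>
    simp only [List.mem_cons, not_or] at h
    simp [specKeep, ih h.2, Ne.symm h.1]

theorem specKeep_erase (v : String) (c : List String) (h : 2 ≤ c.count v) :
    specKeep v (c.erase v) = specKeep v c := by
  induction c with
  | nil => simp at h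
  | cons x xs ih =>
    by_cases hx : x = v
    · subst hx
      have hm : x ∈ xs := by
        rw [List.count_cons_self] at h
        exact List.count_pos_iff.1 (by omega)
      simp [List.erase_cons_head, specKeep, hm]
    · rw [List.count_cons_of_ne hx] at h
      have he : (x :: xs).erase v = x :: xs.erase v := List.erase_cons_tail (by simp [hx])
      rw [he]
      simp [specKeep, hx, ih h]

theorem specKeep_decomp (v : String) (pre suf : List String)
    (hp : v ∉ pre) (hs : v ∉ suf) :
    specKeep v (pre ++ v :: suf) = pre ++ "." :: suf := by
  induction pre with
  | nil => simp [specKeep, hs]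
  | cons a t ih =>
    simp only [List.mem_cons, not_or] at hp
    simp [specKeep, Ne.symm hp.1, ih hp.2]

theorem specKeep_dot_id (c : List String) (h : c.count "." ≤ 1) :
    specKeep "." c = c := by
  induction c with
  | nil => rfl
  | cons x xs ih =>
    by_cases hx : x = "."
    · have hm : "." ∉ xs := by
        intro hmem
        have h1 := List.count_pos_iff.2 hmem
        rw [hx, List.count_cons_self] at h
        omega
      simp [specKeep, hx, hm]
    · rw [List.count_cons_of_ne hx] at h
      simp [specKeep, hx, ih h]

theorem bKeep_of_not_mem (v : String) (xs : List String) (k seen : Nat) (h : v ∉ xs) :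
    bKeep v xs k seen = xs := by
  induction xs generalizing seen with
  | nil => rfl
  | cons x rest ih =>
    simp only [List.mem_cons, not_or] at h
    simp [bKeep, Ne.symm h.1, ih _ h.2]

theorem bKeep_eq_specKeep (v : String) (xs : List String) (k seen : Nat)
    (h : k = seen + xs.count v) :
    bKeep v xs k seen = specKeep v xs := by
  induction xs generalizing seen with
  | nil => rfl
  | cons x rest ih =>
    by_cases hx : x = v
    · subst hx
      rw [List.count_cons_self] at h
      by_cases hm : x ∈ rest
      · have hc : 0 < rest.count x := List.count_pos_iff.2 hm
        have hne : ¬ (seen + 1 = k) := by omega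
        simp [bKeep, specKeep, hm, hne, ih (seen + 1) (by omega)]
      · have hc : rest.count x = 0 := List.count_eq_zero_of_not_mem hm
        have heq : seen + 1 = k := by omega
        simp [bKeep, specKeep, hm, heq, bKeep_of_not_mem _ _ _ _ hm]
    · rw [List.count_cons_of_ne hx] at h
      simp [bKeep, specKeep, hx, ih seen h]

theorem keep_last_eq_specKeep (xs : List String) (v : String) :
    keep_last xs v = specKeep v xs := by
  unfold keep_last
  exact bKeep_eq_specKeep v xs _ 0 (by simp [PySem.List.count_eq])

theorem aFin_eq_specKeep (c : List String) : aFin c = specKeep "." c := by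
  induction c using aFin.induct with
  | case1 c hgt c' h2 ih =>
    have hm : "." ∈ c := by
      by_contra hn
      simp [PySem.List.count_eq, List.count_eq_zero_of_not_mem hn] at hgt
    rw [PySem.List.remove?_eq_some_erase _ _ hm] at h2
    injection h2 with h3
    subst h3
    rw [aFin]
    simp only [hgt, if_pos]
    split
    · next c2 h4 =>
        rw [PySem.List.remove?_eq_some_erase _ _ hm] at h4
        injection h4 with h5
        subst h5
        rw [ih]
        exact specKeep_erase "." c (by simp [PySem.List.count_eq] at hgt; omega)
    · next h4 =>
        rw [PySem.List.remove?_eq_some_erase _ _ hm] at h4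
        simp at h4
  | case2 c hgt h2 =>
    exfalso
    have hm : "." ∈ c := by
      by_contra hn
      simp [PySem.List.count_eq, List.count_eq_zero_of_not_mem hn] at hgt
    rw [PySem.List.remove?_eq_some_erase _ _ hm] at h2
    simp at h2
  | case3 c hle =>
    rw [aFin]
    simp only [hle, if_neg, not_false_iff]
    exact (specKeep_dot_id c (by simp [PySem.List.count_eq] at hle; omega)).symm

theorem aLoop1_eq_specKeep (c : List String) : aLoop1 c = specKeep "," c := by
  induction c using aLoop1.induct with
  | case1 c h h1 i hidx =>
    obtain ⟨pre, suf, rfl, rfl, hp⟩ := (PySem.List.index?_eq_some_iff _ _ _).1 hidx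
    have hcnt : (pre ++ "," :: suf).count "," = 1 := by
      have := (beq_iff_eq).1 h1
      simpa [PySem.List.count_eq] using this
    have hs : "," ∉ suf := by
      intro hm
      have h0 : pre.count "," = 0 := List.count_eq_zero_of_not_mem hp
      have h1' : 0 < suf.count "," := List.count_pos_iff.2 hm
      simp [List.count_append, h0] at hcnt
      omega
    have hset : (pre ++ "," :: suf).set pre.length "." = pre ++ "." :: suf := by
      induction pre with
      | nil => simp
      | cons a t ih => simp
    rw [aLoop1]
    simp only [h, dif_pos, h1, if_pos]
    split
    · next i2 h4 =>
        rw [hidx] at h4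
        injection h4 with h5
        subst h5
        rw [hset]
        exact (specKeep_decomp "," pre suf hp hs).symm
    · next h4 =>
        rw [PySem.List.index?_eq_none_iff] at h4
        exact absurd h h4
  | case2 c h h1 hidx =>
    exfalso
    rw [PySem.List.index?_eq_none_iff] at hidx
    exact hidx h
  | case3 c h h1 c' h2 ih =>
    rw [PySem.List.remove?_eq_some_erase _ _ h] at h2
    injection h2 with h3
    subst h3
    rw [aLoop1]
    simp only [h, dif_pos]
    rw [if_neg h1]
    split
    · next c2 h4 =>
        rw [PySem.List.remove?_eq_some_erase _ _ h] at h4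
        injection h4 with h5
        subst h5
        rw [ih]
        refine specKeep_erase "," c ?_
        have hpos : 0 < c.count "," := List.count_pos_iff.2 h
        have hne : ¬ c.count "," = 1 := by
          intro he
          apply h1
          simp [PySem.List.count_eq, he]
        omega
    · next h4 =>
        rw [PySem.List.remove?_eq_some_erase _ _ h] at h4
        simp at h4
  | case4 c h h1 h2 =>
    exfalso
    rw [PySem.List.remove?_eq_some_erase _ _ h] at h2
    simp at h2
  | case5 c h =>
    rw [aLoop1]
    simp only [h, dif_neg, not_false_iff]
    exact (specKeep_of_not_mem "," c h).symm

theorem filter_erase_ne (v : String) (c : List String) :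
    (c.erase v).filter (fun x => x != v) = c.filter (fun x => x != v) := by
  induction c with
  | nil => rfl
  | cons x xs ih =>
    by_cases hx : x = v
    · subst hx
      simp [List.erase_cons_head]
    · have he : (x :: xs).erase v = x :: xs.erase v := List.erase_cons_tail (by simp [hx])
      rw [he]
      simp [hx, ih]

theorem aDel_eq_filter (v : String) (c : List String) :
    aDel v c = c.filter (fun x => x != v) := by
  induction c using aDel.induct v with
  | case1 c h c' h2 ih =>
    rw [PySem.List.remove?_eq_some_erase _ _ h] at h2
    injection h2 with h3
    subst h3
    rw [aDel]
    simp only [h, dif_pos]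
    split
    · next c2 h4 =>
        rw [PySem.List.remove?_eq_some_erase _ _ h] at h4
        injection h4 with h5
        subst h5
        rw [ih]
        exact filter_erase_ne v c
    · next h4 =>
        rw [PySem.List.remove?_eq_some_erase _ _ h] at h4
        simp at h4
  | case2 c h h2 =>
    rw [PySem.List.remove?_eq_some_erase _ _ h] at h2; simp at h2
  | case3 c h =>
    rw [aDel]
    simp only [h, dif_neg, not_false_iff]
    exact (List.filter_eq_self.2 (fun x hx => by simp; rintro rfl; exact h hx)).symm

theorem aRepl_eq_map (c : List String) :
    aRepl c = c.map (fun x => if x = "," then "." else x) := by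
  induction c using aRepl.induct with
  | case1 c h i hidx ih =>
    obtain ⟨pre, suf, heq, rfl, hp⟩ := (PySem.List.index?_eq_some_iff _ _ _).1 hidx
    subst heq
    have hset : (pre ++ "," :: suf).set pre.length "." = pre ++ "." :: suf := by
      induction pre with
      | nil => simp
      | cons a t ih => simp
    rw [aRepl]
    simp only [h, dif_pos]
    split
    · next i2 h4 =>
        rw [hidx] at h4
        injection h4 with h5
        subst h5
        rw [ih, hset]
        simp [List.map_append]
    · next h4 =>
        rw [PySem.List.index?_eq_none_iff] at h4
        exact absurd h h4
  | case2 c h hidx =>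
    exfalso
    rw [PySem.List.index?_eq_none_iff] at hidx
    exact hidx h
  | case3 c h =>
    rw [aRepl]
    simp only [h, dif_neg, not_false_iff]
    have : ∀ x ∈ c, (if x = "," then "." else x) = x := by
      intro x hx
      by_cases hc : x = ","
      · subst hc; exact absurd hx h
      · simp [hc]
    calc c = c.map id := by simp
    _ = c.map (fun x => if x = "," then "." else x) := List.map_congr_left (fun x hx => ((this x hx).symm))

theorem no_comma_map (c : List String) :
    "," ∉ (c.map (fun x => if x = "," then "." else x)).filter (fun x => x != ".") := by
  intro hm
  rw [List.mem_filter] at hm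
  obtain ⟨hm1, hm2⟩ := hm
  rw [List.mem_map] at hm1
  obtain ⟨x, _, hx⟩ := hm1
  by_cases hc : x = "," <;> simp [hc] at hx

theorem map_filter_eq (c : List String) :
    ((c.map (fun x => if x = "," then "." else x)).filter (fun x => x != ".")) =
      c.filter (fun x => !(x == "," || x == ".")) := by
  induction c with
  | nil => rfl
  | cons x xs ih =>
    by_cases hc : x = ","
    · subst hc; simp [ih]
    · by_cases hd : x = "."
      · subst hd; simp [ih]
      · simp [hc, hd, ih]

theorem aRepl_of_not_mem (c : List String) (h : "," ∉ c) : aRepl c = c := by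
  rw [aRepl]
  simp [h]

theorem make_nice_eq (c : List String) (p : Int) : make_nice c p = make_nice_alt c p := by
  unfold make_nice make_nice_alt
  cases hb1 : (p == 1) with
  | true =>
    simp only [if_true]
    rw [aFin_eq_specKeep, aLoop1_eq_specKeep, keep_last_eq_specKeep, keep_last_eq_specKeep]
  | false =>
    cases hb0 : (p == 0) with
    | true =>
      simp only [if_true, Bool.false_eq_true, if_false]
      rw [aFin_eq_specKeep, aDel_eq_filter, keep_last_eq_specKeep]
    | false =>
      simp only [Bool.false_eq_true, if_false]
      rw [aRepl_eq_map c, aDel_eq_filter, aRepl_of_not_mem _ (no_comma_map c),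
        map_filter_eq, aFin_eq_specKeep, keep_last_eq_specKeep]

-- ===== VERDICT (by name: the statement is the Claim_ definition above) =====
theorem make_nice_spec : Claim_equal_make_nice := by
  intro c p _
  exact make_nice_eq c p
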